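-- pv_equiv track=rewrite | github.com/SimonDaKappa/RPI-Work | Intro to Computer Science/Homework/hw6_files/hw6_sol.py | parse
-- ===== SOURCE A (Python) =====
-- def parse(file1):
--     """Converts file to list of strings: Removes non alphabet characters, strips whitespace"""
--     strings = []
--
--     for line in file1: #Turns the file into a list of non-whitespace strings
--         temp = line.split()
--         for string in temp:
--             strings.append(string.strip())
--
--     for i in range(len(strings)):
--         strings[i] = strings[i].lower()
--         tempstring = ""
--         for c in range(len ( strings[i] )):
--             if strings[i][c].isalpha():
--                 tempstring+= strings[i][c]
--         strings[i] = tempstring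
--     new = strings.copy()
--
--     c = 0
--     for i in range(len(strings)):
--         if strings[i] == "":
--             del new[i - c]
--             c+=1
--
--     return new
-- ===== SOURCE B (Python) =====
-- def parse(file1):
--     """Converts file to list of strings: Removes non alphabet characters, strips whitespace"""
--     words = []
--     for line in file1:
--         for token in line.split():
--             cleaned = ''.join(c for c in token.lower() if c.isalpha())
--             if cleaned:
--                 words.append(cleaned)
--     return words
-- ===== Notes on version B (the rewrite author's own statement) =====
-- stated objective: simpler
-- what changed: B builds the result in one direct pass (append each cleaned non-empty token as it is produced) instead of A's three sequential passes: flatten into a token list, rewrite each entry in place, then delete empties from a copy with an offset counter.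
import Mathlib
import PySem

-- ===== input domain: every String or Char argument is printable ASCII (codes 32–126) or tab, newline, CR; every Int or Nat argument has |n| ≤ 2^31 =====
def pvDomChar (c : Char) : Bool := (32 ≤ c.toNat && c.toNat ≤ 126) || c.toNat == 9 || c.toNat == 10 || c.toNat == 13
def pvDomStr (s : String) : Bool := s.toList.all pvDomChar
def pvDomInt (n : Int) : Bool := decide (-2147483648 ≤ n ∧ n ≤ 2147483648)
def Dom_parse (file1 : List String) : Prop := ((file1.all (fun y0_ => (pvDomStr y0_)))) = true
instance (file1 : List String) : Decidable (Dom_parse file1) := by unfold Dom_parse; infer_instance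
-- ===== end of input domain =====

-- B builds the result in one direct pass instead of A's three passes (flatten, in-place rewrite, copy-with-offset deletion); same return value, no speed claim.

-- ===== PORT A =====
-- third pass of A: 'del new[i - c]' with offset counter c; k = i - c (always ≥ 0 in Python) is the deletion index
def parseDelGo : List String → List String → Nat → List String
  | [], new, _ => new
  | s :: rest, new, k =>
      if s = "" then parseDelGo rest (new.eraseIdx k) k
      else parseDelGo rest new (k + 1)

def parse (file1 : List String) : List String :=
  -- pass 1: strings.append(string.strip()) for each token of each line
  let strings := file1.foldl (fun acc line =>
    (PySem.Str.split₀ line).foldl (fun acc s => acc ++ [PySem.Str.strip s]) acc) []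
  -- pass 2: strings[i] = alpha-only characters of strings[i].lower() (in-place rewrite = map)
  let strings2 := strings.map (fun s =>
    let s := PySem.Str.lower s
    let tempstring := s.toList.foldl (fun t c => if PySem.Chars.isalpha c then t ++ [c] else t) []
    String.ofList tempstring)
  -- pass 3: new = strings.copy(); then delete empties with the offset counter
  parseDelGo strings2 strings2 0

-- ===== PORT B =====
def parse_alt (file1 : List String) : List String :=
  file1.foldl (fun words line =>
    (PySem.Str.split₀ line).foldl (fun words tok =>
      let cleaned := String.ofList ((PySem.Str.lower tok).toList.filter PySem.Chars.isalpha)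
      if cleaned ≠ "" then words ++ [cleaned] else words) words) []

-- ===== PRECONDITION & SPEC =====
def Spec_parse (file1 : List String) (out : List String) : Prop := out = parse_alt file1
instance (file1 : List String) (out : List String) : Decidable (Spec_parse file1 out) := by unfold Spec_parse; infer_instance

-- ===== CLAIM (what is proved, stated in full; the proofs are below) =====
def Claim_equal_parse : Prop := ∀ (file1 : List String), Dom_parse file1 → Spec_parse file1 (parse file1)

-- ===== LEMMAS AND PROOFS =====

-- A's character-accumulating inner loop is a filter
theorem parse_inner_filter (cs : List Char) :
    cs.foldl (fun t c => if PySem.Chars.isalpha c then t ++ [c] else t) [] =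
    cs.filter PySem.Chars.isalpha := by
  simpa using PySem.List.foldl_append_if_eq_filter PySem.Chars.isalpha cs []

-- A's deletion loop with the offset counter is a filter of the scanned list
theorem parseDelGo_eq_filter (l pre : List String) :
    parseDelGo l (pre ++ l) pre.length = pre ++ l.filter (· ≠ "") := by
  induction l generalizing pre with
  | nil => simp [parseDelGo]
  | cons s rest ih =>
    by_cases hs : s = ""
    · subst hs
      have herase : (pre ++ "" :: rest).eraseIdx pre.length = pre ++ rest := by
        simpa using List.eraseIdx_append_of_length_le (le_refl pre.length) ("" :: rest)
      rw [show parseDelGo ("" :: rest) (pre ++ "" :: rest) pre.length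
            = parseDelGo rest (pre ++ rest) pre.length by simp [parseDelGo, herase]]
      simpa using ih pre
    · rw [show parseDelGo (s :: rest) (pre ++ s :: rest) pre.length
            = parseDelGo rest ((pre ++ [s]) ++ rest) (pre ++ [s]).length by
          simp [parseDelGo, hs]]
      rw [ih (pre ++ [s])]
      simp [hs]

theorem isupper_iff (c : Char) : PySem.Chars.isupper c = true ↔ 65 ≤ c.toNat ∧ c.toNat ≤ 90 := by
  simp only [PySem.Chars.isupper, Bool.and_eq_true, decide_eq_true_eq, Char.le_def,
    UInt32.le_iff_toNat_le]
  rfl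

theorem islower_iff (c : Char) : PySem.Chars.islower c = true ↔ 97 ≤ c.toNat ∧ c.toNat ≤ 122 := by
  simp only [PySem.Chars.islower, Bool.and_eq_true, decide_eq_true_eq, Char.le_def,
    UInt32.le_iff_toNat_le]
  rfl

-- whitespace never lowercases to a letter
theorem isalpha_lowerChar_of_isspace (c : Char) (h : PySem.Chars.isspace c = true) :
    PySem.Chars.isalpha (PySem.Chars.lowerChar c) = false := by
  simp only [PySem.Chars.isspace, Bool.or_eq_true, Bool.and_eq_true, decide_eq_true_eq] at h
  have hu : ¬ PySem.Chars.isupper c = true := fun hc => by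
    have := (isupper_iff c).mp hc; omega
  have hl : ¬ PySem.Chars.islower c = true := fun hc => by
    have := (islower_iff c).mp hc; omega
  simp only [PySem.Chars.lowerChar, if_neg hu]
  simp only [PySem.Chars.isalpha, Bool.or_eq_false_iff]
  exact ⟨Bool.eq_false_iff.mpr hu, Bool.eq_false_iff.mpr hl⟩

theorem filter_lower_dropWhile (cs : List Char) :
    (PySem.Chars.lower (cs.dropWhile PySem.Chars.isspace)).filter PySem.Chars.isalpha =
    (PySem.Chars.lower cs).filter PySem.Chars.isalpha := by
  induction cs with
  | nil => rfl
  | cons c cs ih =>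
    by_cases h : PySem.Chars.isspace c = true
    · rw [List.dropWhile_cons_of_pos h, ih]
      simp [PySem.Chars.lower, isalpha_lowerChar_of_isspace c h]
    · rw [List.dropWhile_cons_of_neg h]

-- stripping a token does not change its alpha-filtered lowercase form
theorem filter_lower_strip (cs : List Char) :
    (PySem.Chars.lower (PySem.Chars.strip cs)).filter PySem.Chars.isalpha =
    (PySem.Chars.lower cs).filter PySem.Chars.isalpha := by
  have key : ∀ l : List Char,
      (PySem.Chars.lower (l.dropWhile PySem.Chars.isspace)).filter PySem.Chars.isalpha =
      (PySem.Chars.lower l).filter PySem.Chars.isalpha := filter_lower_dropWhile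
  simp only [PySem.Chars.strip, PySem.Chars.lstrip, PySem.Chars.rstrip, PySem.Chars.lower,
    List.map_reverse, List.filter_reverse] at *
  rw [key, ← List.filter_reverse, ← List.map_reverse, List.reverse_reverse, key]

-- the per-token cleaning function of A (strip, then lower, then keep letters) equals B's
theorem clean_strip_eq (s : String) :
    String.ofList ((PySem.Str.lower (PySem.Str.strip s)).toList.filter PySem.Chars.isalpha) =
    String.ofList ((PySem.Str.lower s).toList.filter PySem.Chars.isalpha) := by
  rw [PySem.Str.toList_lower, PySem.Str.toList_lower, PySem.Str.toList_strip, filter_lower_strip]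

-- ===== VERDICT (by name: the statement is the Claim_ definition above) =====
theorem parse_spec : Claim_equal_parse := by
  intro file1 _
  unfold Spec_parse parse parse_alt
  -- A: pass 1 is a flatMap of maps of strip
  simp only [PySem.List.foldl_append_singleton_eq_map]
  rw [PySem.List.foldl_append_eq_flatMap (fun line => (PySem.Str.split₀ line).map PySem.Str.strip) file1 []]
  simp only [List.nil_append, parse_inner_filter]
  -- A: pass 3 is a filter
  have hdel := parseDelGo_eq_filter
      ((file1.flatMap (fun line => (PySem.Str.split₀ line).map PySem.Str.strip)).map
        (fun s => String.ofList ((PySem.Str.lower s).toList.filter PySem.Chars.isalpha))) []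
  simp only [List.nil_append, List.length_nil] at hdel
  rw [hdel]
  -- B: the nested folds are a flatMap of filtered maps
  have hB : ∀ (lines : List String) (acc : List String),
      lines.foldl (fun words line =>
        (PySem.Str.split₀ line).foldl (fun words tok =>
          let cleaned := String.ofList ((PySem.Str.lower tok).toList.filter PySem.Chars.isalpha)
          if cleaned ≠ "" then words ++ [cleaned] else words) words) acc =
      acc ++ lines.flatMap (fun line =>
        ((PySem.Str.split₀ line).filter
            (fun tok => decide (String.ofList ((PySem.Str.lower tok).toList.filter PySem.Chars.isalpha) ≠ ""))).map
          (fun tok => String.ofList ((PySem.Str.lower tok).toList.filter PySem.Chars.isalpha))) := by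
    intro lines
    induction lines with
    | nil => simp
    | cons line rest ih =>
      intro acc
      simp only [List.foldl_cons, List.flatMap_cons]
      rw [PySem.List.foldl_append_ite
        (fun tok => String.ofList ((PySem.Str.lower tok).toList.filter PySem.Chars.isalpha) ≠ "")
        (fun tok => String.ofList ((PySem.Str.lower tok).toList.filter PySem.Chars.isalpha))
        (PySem.Str.split₀ line) acc, ih, List.append_assoc]
  rw [hB file1 [], List.nil_append]
  -- both sides are flatMaps over the lines: compare per line, then per token
  rw [List.map_flatMap, List.filter_flatMap]
  congr 1
  funext line
  rw [List.map_map, List.filter_map]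
  have hfun : ((fun s => String.ofList ((PySem.Str.lower s).toList.filter PySem.Chars.isalpha)) ∘ PySem.Str.strip)
      = fun tok => String.ofList ((PySem.Str.lower tok).toList.filter PySem.Chars.isalpha) := by
    funext s
    exact clean_strip_eq s
  rw [hfun]
  simp only [Function.comp_def, decide_not]
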